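-- pv_equiv track=rewrite | github.com/theablemo/DistilKaggle | 5/utility/3_cell_metrics_generator.py | header2_counter
-- ===== SOURCE A (Python) =====
-- def header2_counter(text):
--     count = 0
--     if text[0:3] =='## ':
--         count += 1
--     for i in range(len(text)-2):
--         if text[i:i+4] ==' ## ' or text[i:i+4] == '\n## ':
--             count +=1
--     return count
-- ===== SOURCE B (Python) =====
-- def header2_counter(text):
--     # Single left-to-right scan with a boundary flag: a '## ' header counts
--     # when it sits at the start of the string or right after a space/newline.
--     count = 0
--     boundary = True
--     for p in range(len(text)):
--         if boundary and text[p:p+3] == '## ':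
--             count += 1
--         boundary = text[p] in ' \n'
--     return count
-- ===== Notes on version B (the rewrite author's own statement) =====
-- stated objective: simpler
-- what changed: Replaced A's special-cased prefix test plus 4-char window comparisons over range(len-2) with a single left-to-right scan that carries a boundary flag and makes one 3-char comparison per position.
import Mathlib
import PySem

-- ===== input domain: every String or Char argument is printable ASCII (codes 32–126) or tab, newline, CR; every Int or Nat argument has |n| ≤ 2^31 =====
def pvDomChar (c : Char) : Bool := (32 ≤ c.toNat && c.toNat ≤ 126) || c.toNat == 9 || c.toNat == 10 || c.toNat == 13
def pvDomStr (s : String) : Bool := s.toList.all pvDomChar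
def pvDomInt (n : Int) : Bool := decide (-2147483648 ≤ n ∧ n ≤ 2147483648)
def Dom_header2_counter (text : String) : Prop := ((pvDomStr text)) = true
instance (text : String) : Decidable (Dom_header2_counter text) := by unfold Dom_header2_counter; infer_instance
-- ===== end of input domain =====

-- B replaces A's special-cased prefix test plus 4-char window comparisons by a single
-- left-to-right scan with a boundary flag and one 3-char comparison per position (simpler).

-- ===== PORT A =====
-- Literal port of A: prefix check text[0:3] == '## ', then for i in range(len(text)-2)
-- compare the 4-char slices text[i:i+4] with ' ## ' and '\n## '.
def header2_counter (text : String) : Int :=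
  let s := text.toList
  let count : Int := 0
  let count := if PySem.List.slice s (some 0) (some 3) = ['#', '#', ' '] then count + 1 else count
  (PySem.List.pyRange 0 ((s.length : Int) - 2)).foldl
    (fun count i =>
      if PySem.List.slice s (some i) (some (i + 4)) = [' ', '#', '#', ' '] ∨
          PySem.List.slice s (some i) (some (i + 4)) = ['\n', '#', '#', ' '] then count + 1
      else count) count

-- ===== PORT B =====
-- Literal port of B: one pass p = 0..len-1 carrying (count, boundary); counts when the
-- 3-char slice text[p:p+3] == '## ' is seen at a boundary; 'text[p] in " \n"' is the
-- membership test on the character (p is always in range, so pyGet? is never none).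
def header2_counter_alt (text : String) : Int :=
  let s := text.toList
  let r := (PySem.List.pyRange 0 (s.length : Int)).foldl
    (fun (st : Int × Bool) p =>
      (if st.2 ∧ PySem.List.slice s (some p) (some (p + 3)) = ['#', '#', ' '] then st.1 + 1
       else st.1,
       match PySem.List.pyGet? s p with
       | some c => decide (c = ' ' ∨ c = '\n')
       | none => false))
    (0, true)
  r.1

-- ===== PRECONDITION & SPEC =====
def Spec_header2_counter (text : String) (out : Int) : Prop := out = header2_counter_alt text
instance (text : String) (out : Int) : Decidable (Spec_header2_counter text out) := by unfold Spec_header2_counter; infer_instance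

-- ===== CLAIM (what is proved, stated in full; the proofs are below) =====
def Claim_equal_header2_counter : Prop := ∀ (text : String), Dom_header2_counter text → Spec_header2_counter text (header2_counter text)

-- ===== LEMMAS AND PROOFS =====

-- boundary flag B carries before reading position k
def pvBnd (s : List Char) (k : Nat) : Bool :=
  decide (k = 0) || decide (s[k - 1]? = some ' ') || decide (s[k - 1]? = some '\n')

-- B's per-position indicator
def pvPB (s : List Char) (p : Nat) : Bool :=
  pvBnd s p && decide ((s.drop p).take 3 = ['#', '#', ' '])

-- A's per-index indicator, in drop/take form
def pvPA (s : List Char) (i : Nat) : Bool :=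
  decide ((s.drop i).take 4 = [' ', '#', '#', ' ']) ||
    decide ((s.drop i).take 4 = ['\n', '#', '#', ' '])

lemma pvSlice (s : List Char) (k m : Nat) :
    PySem.List.slice s (some (k : Int)) (some ((k : Int) + (m : Int))) = (s.drop k).take m := by
  have h : ((k : Int) + (m : Int)) = ((k + m : Nat) : Int) := by push_cast; ring
  rw [h, PySem.List.slice_natCast]
  congr 1
  omega

lemma pvSlice3 (s : List Char) (k : Nat) :
    PySem.List.slice s (some (k : Int)) (some ((k : Int) + 3)) = (s.drop k).take 3 := by
  have := pvSlice s k 3; simpa using this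

lemma pvSlice4 (s : List Char) (k : Nat) :
    PySem.List.slice s (some (k : Int)) (some ((k : Int) + 4)) = (s.drop k).take 4 := by
  have := pvSlice s k 4; simpa using this

-- A's fold in closed form
lemma pvA_closed (text : String) :
    header2_counter text =
      (if text.toList.take 3 = ['#', '#', ' '] then (1 : Int) else 0)
        + (List.countP (pvPA text.toList) (List.range (text.toList.length - 2)) : Int) := by
  simp only [header2_counter]
  have h03 : PySem.List.slice text.toList (some 0) (some 3) = text.toList.take 3 := by
    have := PySem.List.slice_natCast text.toList 0 3; simpa using this
  have hfun : (fun (count : Int) (i : Int) =>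
      if PySem.List.slice text.toList (some i) (some (i + 4)) = [' ', '#', '#', ' '] ∨
          PySem.List.slice text.toList (some i) (some (i + 4)) = ['\n', '#', '#', ' '] then
        count + 1
      else count)
      = (fun (count : Int) (i : Int) =>
        if (decide (PySem.List.slice text.toList (some i) (some (i + 4)) = [' ', '#', '#', ' ']) ||
            decide (PySem.List.slice text.toList (some i) (some (i + 4)) = ['\n', '#', '#', ' '])) = true
        then count + 1 else count) := by
    funext c i
    by_cases h1 : PySem.List.slice text.toList (some i) (some (i + 4)) = [' ', '#', '#', ' '] <;>
      by_cases h2 : PySem.List.slice text.toList (some i) (some (i + 4)) = ['\n', '#', '#', ' '] <;>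
      simp [h1, h2]
  rw [hfun, PySem.List.foldl_count_if, h03]
  rcases Nat.lt_or_ge text.toList.length 2 with h2 | h2
  · have hr : PySem.List.pyRange 0 ((text.toList.length : Int) - 2) = [] := by
      interval_cases h : text.toList.length <;> decide
    have hn : text.toList.length - 2 = 0 := by omega
    rw [hr, hn]
    simp
  · have hcast : ((text.toList.length : Int) - 2) = ((text.toList.length - 2 : Nat) : Int) := by
      omega
    rw [hcast, PySem.List.pyRange_zero_natCast, List.countP_map]
    have hp : ((fun i : Int =>
        decide (PySem.List.slice text.toList (some i) (some (i + 4)) = [' ', '#', '#', ' ']) ||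
          decide (PySem.List.slice text.toList (some i) (some (i + 4)) = ['\n', '#', '#', ' ']))
        ∘ (fun k : Nat => (k : Int))) = pvPA text.toList := by
      funext k
      simp [Function.comp, pvSlice4, pvPA]
    rw [hp]
    simp

-- B's fold invariant: after the first k steps the state is (count over range k, boundary at k)
lemma pvB_inv (s : List Char) (k : Nat) :
    (List.map (fun i : Nat => (i : Int)) (List.range k)).foldl
      (fun (st : Int × Bool) p =>
        (if st.2 ∧ PySem.List.slice s (some p) (some (p + 3)) = ['#', '#', ' '] then st.1 + 1
         else st.1,
         match PySem.List.pyGet? s p with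
         | some c => decide (c = ' ' ∨ c = '\n')
         | none => false))
      (0, true)
    = ((List.countP (pvPB s) (List.range k) : Int), pvBnd s k) := by
  induction k with
  | zero => simp [pvBnd]
  | succ m ih =>
    rw [List.range_succ, List.map_append, List.foldl_append, ih]
    simp only [List.map_cons, List.map_nil, List.foldl_cons, List.foldl_nil]
    rw [Prod.mk.injEq]
    constructor
    · rw [pvSlice3]
      by_cases hb : pvBnd s m = true <;>
        by_cases ht : (s.drop m).take 3 = ['#', '#', ' '] <;>
        simp [List.countP_append, pvPB, hb, ht]
    · have hg : PySem.List.pyGet? s (m : Int) = s[m]? := by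
        simp only [PySem.List.pyGet?, PySem.List.pyIdx?]
        by_cases hm : m < s.length <;> simp [hm]
      rw [hg]
      cases hc : s[m]? with
      | none => simp [pvBnd, hc]
      | some c => by_cases h1 : c = ' ' <;> by_cases h2 : c = '\n' <;> simp [pvBnd, hc, h1, h2]

-- B in closed form
lemma pvB_closed (text : String) :
    header2_counter_alt text
      = (List.countP (pvPB text.toList) (List.range text.toList.length) : Int) := by
  simp only [header2_counter_alt]
  rw [PySem.List.pyRange_zero_natCast, pvB_inv]

-- A's indicator at i is B's indicator at i + 1
lemma pvApB (s : List Char) (i : Nat) : pvPA s i = pvPB s (i + 1) := by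
  simp only [pvPA, pvPB, pvBnd]
  rw [Bool.eq_iff_iff]
  simp only [Bool.or_eq_true, Bool.and_eq_true, decide_eq_true_eq, Nat.add_sub_cancel]
  by_cases h : i < s.length
  · have hd : s.drop i = s[i] :: s.drop (i + 1) := List.drop_eq_getElem_cons h
    have hg : s[i]? = some s[i] := List.getElem?_eq_getElem h
    rw [hd, hg]
    simp only [List.take_succ_cons, List.cons.injEq, Option.some.injEq]
    constructor
    · rintro (⟨h1, h2⟩ | ⟨h1, h2⟩) <;> exact ⟨by tauto, h2⟩
    · rintro ⟨(h1 | h1) | h1, h2⟩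
      · omega
      · exact Or.inl ⟨h1, h2⟩
      · exact Or.inr ⟨h1, h2⟩
  · have hd : s.drop i = [] := List.drop_eq_nil_of_le (by omega)
    have hd1 : s.drop (i + 1) = [] := List.drop_eq_nil_of_le (by omega)
    have hg : s[i]? = none := List.getElem?_eq_none (by omega)
    simp [hd, hd1, hg]

-- the count B collects equals A's prefix term plus A's window count
lemma pvKey (s : List Char) :
    List.countP (pvPB s) (List.range s.length)
      = (if s.take 3 = ['#', '#', ' '] then 1 else 0)
          + List.countP (pvPA s) (List.range (s.length - 2)) := by
  cases hn : s.length with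
  | zero =>
    have hnil : s = [] := List.eq_nil_of_length_eq_zero hn
    simp [hnil]
  | succ m =>
    rw [List.range_succ_eq_map, List.countP_cons, List.countP_map]
    have h0 : (if pvPB s 0 = true then 1 else 0)
        = (if s.take 3 = ['#', '#', ' '] then 1 else 0) := by
      by_cases h : s.take 3 = ['#', '#', ' '] <;> simp [pvPB, pvBnd, h]
    have hcomp : List.countP (pvPB s ∘ Nat.succ) (List.range m)
        = List.countP (pvPA s) (List.range m) := by
      refine List.countP_congr ?_
      intro i _
      rw [show (pvPB s ∘ Nat.succ) i = pvPB s (i + 1) from rfl, ← pvApB s i]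
    rw [h0, hcomp]
    cases m with
    | zero => simp
    | succ t =>
      have hlen : ((s.drop t).take 4).length = 2 := by
        rw [List.length_take, List.length_drop, hn]
        omega
      have hlast : pvPA s t = false := by
        simp only [pvPA, Bool.or_eq_false_iff, decide_eq_false_iff_not]
        constructor <;> intro hEq <;> rw [hEq] at hlen <;> simp at hlen
      have hstep : List.countP (pvPA s) (List.range (t + 1))
          = List.countP (pvPA s) (List.range t) := by
        simp [List.range_succ, List.countP_append, hlast]
      have ht2 : t + 1 + 1 - 2 = t := by omega
      rw [hstep, ht2]
      omega

-- ===== VERDICT (by name: the statement is the Claim_ definition above) =====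
theorem header2_counter_spec : Claim_equal_header2_counter := by
  unfold Claim_equal_header2_counter
  intro text _
  unfold Spec_header2_counter
  rw [pvA_closed, pvB_closed, pvKey]
  push_cast
  ring
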